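-- pv_equiv track=rewrite | github.com/Kimyongari/Solved_coding_problems | 프로그래머스/2/87946. 피로도/피로도.py | solution
-- ===== SOURCE A (Python) =====
-- from itertools import permutations
--
-- def solution(k, dungeons):
--     answer = []
--     l = []
--     for i in range(1, len(dungeons)+1):
--         a = list(permutations(dungeons, i))
--         for i in a:
--             l.append(i)
--     for i in l:
--         result = 0
--         now = k
--         for j in i:
--             a,b = j
--             if now >= a:
--                 now -= b
--                 result += 1
--         answer.append(result)
--     return max(answer)
-- ===== SOURCE B (Python) =====
-- def solution(k, dungeons):
--     def dfs(stamina, ds):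
--         best = 0
--         for i, (need, cost) in enumerate(ds):
--             if stamina >= need:
--                 c = 1 + dfs(stamina - cost, ds[:i] + ds[i+1:])
--                 if c > best:
--                     best = c
--         return best
--     return dfs(k, dungeons)
-- ===== Notes on version B (the rewrite author's own statement) =====
-- stated objective: faster
-- what changed: Replaced enumerating every permutation of every length (itertools.permutations for each length, then a greedy skip-scan per permutation) by a recursive depth-first search that only branches on dungeons that are currently affordable, returning the maximal clear count directly.
import Mathlib
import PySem

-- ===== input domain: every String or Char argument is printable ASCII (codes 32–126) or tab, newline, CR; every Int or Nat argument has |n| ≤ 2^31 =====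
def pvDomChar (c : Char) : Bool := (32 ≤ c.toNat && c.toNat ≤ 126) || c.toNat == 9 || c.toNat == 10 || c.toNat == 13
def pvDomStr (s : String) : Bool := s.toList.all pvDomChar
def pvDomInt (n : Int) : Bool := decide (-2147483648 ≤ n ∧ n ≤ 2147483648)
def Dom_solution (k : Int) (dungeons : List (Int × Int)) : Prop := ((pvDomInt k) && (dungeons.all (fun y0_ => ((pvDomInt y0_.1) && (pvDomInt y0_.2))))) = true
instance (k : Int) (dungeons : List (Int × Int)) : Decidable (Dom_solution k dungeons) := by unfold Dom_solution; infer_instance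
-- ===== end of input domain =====

-- B replaces A's enumeration of all permutations of all lengths by a pruned recursive
-- depth-first search over the remaining dungeons (objective: faster).


-- ===== PORT A =====
-- literal port of A: build l = all permutations of lengths 1..n, greedy-scan each
-- (skipping unaffordable dungeons), collect the counts, return max(answer).
-- max([]) raises ValueError in Python, hence the Option; getD 0 is only reached
-- outside Pre_solution.
def solution (k : Int) (dungeons : List (Int × Int)) : Int :=
  let l := (List.range dungeons.length).foldl
    (fun acc i => acc ++ PySem.List.permutations dungeons (i + 1)) []
  let answer := l.foldl
    (fun acc p => acc ++
      [(p.foldl (fun s j => if s.1 ≥ j.1 then (s.1 - j.2, s.2 + 1) else s) (k, 0)).2]) []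
  (PySem.List.max? answer (fun y => y)).getD 0

-- ===== PORT B =====
-- port of Source B's nested dfs: for each index i with an affordable dungeon,
-- recurse on the list with index i removed (ds[:i] + ds[i+1:]), keep the best count.
def dfsB (k : Int) (ds : List (Int × Int)) : Int :=
  (List.range ds.length).attach.foldl
    (fun best i =>
      match ds[i.1]? with
      | none => best
      | some nc =>
        if k ≥ nc.1 then
          let c := 1 + dfsB (k - nc.2) (ds.eraseIdx i.1)
          if c > best then c else best
        else best) 0
termination_by ds.length
decreasing_by
  have hi : i.1 < ds.length := List.mem_range.mp i.2
  simp [List.length_eraseIdx, hi]; omega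

def solution_alt (k : Int) (dungeons : List (Int × Int)) : Int :=
  dfsB k dungeons

-- ===== PRECONDITION & SPEC =====
-- Pre_ excludes only the empty dungeon list, on which A raises ValueError (max of []).
def Pre_solution (k : Int) (dungeons : List (Int × Int)) : Prop := dungeons ≠ []
instance (k : Int) (dungeons : List (Int × Int)) : Decidable (Pre_solution k dungeons) := by unfold Pre_solution; infer_instance

def pvWitness_solution : Int × (List (Int × Int)) := (80, [(80, 20), (50, 40), (30, 10)])

def Spec_solution (k : Int) (dungeons : List (Int × Int)) (out : Int) : Prop := out = solution_alt k dungeons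
instance (k : Int) (dungeons : List (Int × Int)) (out : Int) : Decidable (Spec_solution k dungeons out) := by unfold Spec_solution; infer_instance

-- ===== CLAIM (what is proved, stated in full; the proofs are below) =====
def Claim_equal_solution : Prop := ∀ (k : Int) (dungeons : List (Int × Int)), Dom_solution k dungeons → Pre_solution k dungeons → Spec_solution k dungeons (solution k dungeons)

-- ===== LEMMAS AND PROOFS =====

-- A's inner greedy scan, named for the proofs.
def greedy (k : Int) (p : List (Int × Int)) : Int :=
  (p.foldl (fun s j => if s.1 ≥ j.1 then (s.1 - j.2, s.2 + 1) else s) (k, 0)).2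

-- candidate value B's fold considers at index i
def Fcand (k : Int) (ds : List (Int × Int)) (i : Nat) : Option Int :=
  match ds[i]? with
  | none => none
  | some nc => if k ≥ nc.1 then some (1 + dfsB (k - nc.2) (ds.eraseIdx i)) else none

-- generic "running max of optional candidates" step
def mstep {α : Type} (F : α → Option Int) (best : Int) (y : α) : Int :=
  match F y with
  | none => best
  | some c => if c > best then c else best

lemma le_mstep {α : Type} (F : α → Option Int) (b : Int) (y : α) : b ≤ mstep F b y := by
  unfold mstep; cases F y with
  | none => exact le_refl b
  | some c => dsimp only; split <;> omega

lemma le_foldl_mstep {α : Type} (F : α → Option Int) (l : List α) (b : Int) :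
    b ≤ l.foldl (mstep F) b := by
  induction l generalizing b with
  | nil => exact le_refl b
  | cons a t ih => exact le_trans (le_mstep F b a) (ih _)

lemma foldl_mstep_ge {α : Type} (F : α → Option Int) {l : List α} {y : α} {c : Int}
    (hy : y ∈ l) (hc : F y = some c) (b : Int) : c ≤ l.foldl (mstep F) b := by
  induction l generalizing b with
  | nil => cases hy
  | cons a t ih =>
    rcases List.mem_cons.mp hy with rfl | hyt
    · refine le_trans ?_ (le_foldl_mstep F t (mstep F b y))
      unfold mstep; rw [hc]; dsimp only; split <;> omega
    · exact ih hyt _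

lemma foldl_mstep_cases {α : Type} (F : α → Option Int) (l : List α) (b v : Int)
    (h : l.foldl (mstep F) b = v) : v = b ∨ ∃ y ∈ l, F y = some v := by
  induction l generalizing b with
  | nil => exact Or.inl h.symm
  | cons a t ih =>
    rcases ih (mstep F b a) h with h0 | ⟨y, hy, hFy⟩
    · unfold mstep at h0
      rcases hF : F a with _ | c
      · rw [hF] at h0; exact Or.inl h0
      · rw [hF] at h0; dsimp only at h0
        by_cases hcb : c > b
        · rw [if_pos hcb] at h0
          exact Or.inr ⟨a, List.mem_cons_self .., by rw [hF, h0]⟩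
        · rw [if_neg hcb] at h0; exact Or.inl h0
    · exact Or.inr ⟨y, List.mem_cons_of_mem _ hy, hFy⟩

lemma dfsB_eq (k : Int) (ds : List (Int × Int)) :
    dfsB k ds = (List.range ds.length).attach.foldl
      (mstep (fun i => Fcand k ds i.1)) 0 := by
  rw [dfsB]
  congr 1
  funext best i
  rcases h : ds[i.1]? with _ | nc
  · simp only [mstep, Fcand, h]
  · simp only [mstep, Fcand, h]
    split <;> rfl

lemma dfsB_nonneg (k : Int) (ds : List (Int × Int)) : 0 ≤ dfsB k ds := by
  rw [dfsB_eq]; exact le_foldl_mstep _ _ 0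

lemma greedy_snd_shift (p : List (Int × Int)) : ∀ (now r : Int),
    (p.foldl (fun s j => if s.1 ≥ j.1 then (s.1 - j.2, s.2 + 1) else s) (now, r)).2
      = r + (p.foldl (fun s j => if s.1 ≥ j.1 then (s.1 - j.2, s.2 + 1) else s) (now, 0)).2 := by
  induction p with
  | nil => intro now r; simp
  | cons ab t ih =>
    intro now r
    by_cases h : now ≥ ab.1
    · simp only [List.foldl_cons, if_pos h]
      rw [ih (now - ab.2) (r + 1), ih (now - ab.2) (0 + 1)]; ring
    · simp only [List.foldl_cons, if_neg h]
      exact ih now r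

lemma greedy_cons (k a b : Int) (t : List (Int × Int)) :
    greedy k ((a, b) :: t) = if k ≥ a then 1 + greedy (k - b) t else greedy k t := by
  unfold greedy
  by_cases h : k ≥ a
  · simp only [List.foldl_cons]
    rw [greedy_snd_shift]
    simp [h]
  · simp [h]

lemma greedy_nonneg (p : List (Int × Int)) : ∀ k, 0 ≤ greedy k p := by
  induction p with
  | nil => intro k; simp [greedy]
  | cons ab t ih =>
    intro k
    obtain ⟨a, b⟩ := ab
    rw [greedy_cons]
    split
    · have := ih (k - b); omega
    · exact ih k

lemma exists_eraseIdx_of_mem {x : Int × Int} {l : List (Int × Int)} (h : x ∈ l) :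
    ∃ i, i < l.length ∧ l[i]? = some x ∧ l.eraseIdx i = l.erase x := by
  induction l with
  | nil => cases h
  | cons y t ih =>
    by_cases hxy : y = x
    · subst hxy
      exact ⟨0, by simp, by simp, by simp [List.erase_cons_head]⟩
    · rcases List.mem_cons.mp h with rfl | hxt
      · exact absurd rfl hxy
      · obtain ⟨i, hi, hg, he⟩ := ih hxt
        refine ⟨i + 1, by simpa using hi, by simpa using hg, ?_⟩
        rw [List.eraseIdx_cons_succ, he, List.erase_cons_tail]
        simp [hxy]

-- upper bound: every greedy scan of a sub-permutation of ds is at most dfsB k ds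
lemma greedy_le_dfsB : ∀ (p : List (Int × Int)) (k : Int) (ds : List (Int × Int)),
    p.Subperm ds → greedy k p ≤ dfsB k ds := by
  intro p
  induction p with
  | nil => intro k ds _; simpa [greedy] using dfsB_nonneg k ds
  | cons ab t ih =>
    intro k ds h
    obtain ⟨a, b⟩ := ab
    have hm : (a, b) ∈ ds := h.subset (List.mem_cons_self ..)
    by_cases hk : k ≥ a
    · have ht : t.Subperm (ds.erase (a, b)) := by
        have := h.erase (a, b)
        simpa [List.erase_cons_head] using this
      obtain ⟨i, hi, hg, he⟩ := exists_eraseIdx_of_mem hm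
      have hF : Fcand k ds i = some (1 + dfsB (k - b) (ds.eraseIdx i)) := by
        simp [Fcand, hg, hk]
      have hub := foldl_mstep_ge (fun y => Fcand k ds y.1)
        (List.mem_attach _ ⟨i, List.mem_range.mpr hi⟩) hF 0
      rw [← dfsB_eq] at hub
      have hrec := ih (k - b) (ds.erase (a, b)) ht
      rw [greedy_cons, if_pos hk]
      rw [he] at hub
      omega
    · have ht : t.Subperm ds := ((List.sublist_cons_self (a, b) t).subperm).trans h
      rw [greedy_cons, if_neg hk]
      exact ih k ds ht

lemma perms_zero (ds : List (Int × Int)) : PySem.List.permutations ds 0 = [[]] := by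
  simp [PySem.List.permutations]

lemma perms_succ (ds : List (Int × Int)) (r : Nat) :
    PySem.List.permutations ds (r + 1) =
      (List.range ds.length).flatMap (fun i =>
        match ds[i]? with
        | none => []
        | some x => (PySem.List.permutations (ds.eraseIdx i) r).map (fun p => x :: p)) := by
  simp only [PySem.List.permutations]
  congr 1
  funext i
  cases ds[i]? <;> rfl

lemma mem_perms_subperm : ∀ (r : Nat) (ds p : List (Int × Int)),
    p ∈ PySem.List.permutations ds r → p.Subperm ds := by
  intro r
  induction r with
  | zero => intro ds p hp; rw [perms_zero] at hp; simp at hp; subst hp; exact List.nil_subperm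
  | succ r ih =>
    intro ds p hp
    rw [perms_succ] at hp
    obtain ⟨i, hi, hpi⟩ := List.mem_flatMap.mp hp
    rcases hg : ds[i]? with _ | x
    · rw [hg] at hpi; simp at hpi
    · rw [hg] at hpi
      obtain ⟨p', hp', rfl⟩ := List.mem_map.mp hpi
      have hsub : p'.Subperm (ds.eraseIdx i) := ih _ _ hp'
      have hperm : (x :: ds.eraseIdx i).Perm ds := by
        have hlt : i < ds.length := List.mem_range.mp hi
        have : ds[i] = x := by
          have := List.getElem?_eq_getElem hlt
          rw [hg] at this; exact (Option.some.inj this).symm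
        rw [← this]
        exact List.getElem_cons_eraseIdx_perm hlt
      exact ((List.subperm_cons x).mpr hsub).trans hperm.subperm

lemma cons_mem_perms {ds : List (Int × Int)} {i : Nat} {x : Int × Int}
    {p : List (Int × Int)} {r : Nat} (hi : i < ds.length) (hg : ds[i]? = some x)
    (hp : p ∈ PySem.List.permutations (ds.eraseIdx i) r) :
    x :: p ∈ PySem.List.permutations ds (r + 1) := by
  rw [perms_succ]
  refine List.mem_flatMap.mpr ⟨i, List.mem_range.mpr hi, ?_⟩
  rw [hg]
  exact List.mem_map.mpr ⟨p, hp, rfl⟩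

-- attainability: dfsB's value is realised by some permutation of that length
lemma dfsB_attain : ∀ (n : Nat) (ds : List (Int × Int)), ds.length ≤ n → ∀ k : Int,
    (dfsB k ds).toNat ≤ ds.length ∧
    ∃ p ∈ PySem.List.permutations ds (dfsB k ds).toNat, greedy k p = dfsB k ds := by
  intro n
  induction n with
  | zero =>
    intro ds hlen k
    have hds : ds = [] := List.length_eq_zero_iff.mp (Nat.le_zero.mp hlen)
    subst hds
    have h0 : dfsB k [] = 0 := by rw [dfsB_eq]; simp
    rw [h0]
    exact ⟨by simp, [], by simp, by simp [greedy]⟩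
  | succ n ih =>
    intro ds hlen k
    rcases foldl_mstep_cases (fun i => Fcand k ds i.1) (List.range ds.length).attach 0
        (dfsB k ds) (dfsB_eq k ds).symm with h0 | ⟨y, _, hFy⟩
    · rw [h0]
      exact ⟨by simp, [], by simp, by simp [greedy]⟩
    · unfold Fcand at hFy
      rcases hg : ds[y.1]? with _ | nc
      · rw [hg] at hFy; simp at hFy
      · rw [hg] at hFy; dsimp only at hFy
        by_cases hk : k ≥ nc.1
        · rw [if_pos hk] at hFy
          have hv : dfsB k ds = 1 + dfsB (k - nc.2) (ds.eraseIdx y.1) := (Option.some.inj hFy).symm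
          have hlt : y.1 < ds.length := List.mem_range.mp y.2
          have hlen' : (ds.eraseIdx y.1).length ≤ n := by
            rw [List.length_eraseIdx]; simp [hlt]; omega
          obtain ⟨hle', p', hp', hgp'⟩ := ih (ds.eraseIdx y.1) hlen' (k - nc.2)
          have hw : 0 ≤ dfsB (k - nc.2) (ds.eraseIdx y.1) := dfsB_nonneg _ _
          have htn : (dfsB k ds).toNat = (dfsB (k - nc.2) (ds.eraseIdx y.1)).toNat + 1 := by
            omega
          have hlenE : (ds.eraseIdx y.1).length = ds.length - 1 := by
            rw [List.length_eraseIdx]; simp [hlt]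
          refine ⟨by omega, nc :: p', ?_, ?_⟩
          · rw [htn]; exact cons_mem_perms hlt hg hp'
          · obtain ⟨a, b⟩ := nc
            rw [greedy_cons, if_pos hk, hgp', hv]
        · rw [if_neg hk] at hFy; cases hFy

-- for ds ≠ [] there is a length-1 permutation
lemma perms_one_exists {ds : List (Int × Int)} (h : ds ≠ []) :
    ∃ p, p ∈ PySem.List.permutations ds 1 := by
  obtain ⟨x, t, rfl⟩ := List.exists_cons_of_ne_nil h
  refine ⟨[x], cons_mem_perms (x := x) (i := 0) (r := 0) (by simp) (by simp) ?_⟩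
  simp

-- ===== VERDICT (by name: the statement is the Claim_ definition above) =====
theorem solution_spec : Claim_equal_solution := by
  intro k dungeons _ hpre
  unfold Spec_solution solution solution_alt
  rw [PySem.List.foldl_append_eq_flatMap]
  dsimp only
  rw [PySem.List.foldl_append_singleton_eq_map]
  have hgr : (fun p : List (Int × Int) =>
      (List.foldl (fun s j => if s.1 ≥ j.1 then (s.1 - j.2, s.2 + 1) else s) (k, 0) p).2)
      = fun p => greedy k p := rfl
  rw [hgr]
  simp only [List.nil_append]
  set L := (List.range dungeons.length).flatMap (fun i => PySem.List.permutations dungeons (i + 1)) with hL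
  set v := dfsB k dungeons with hv
  -- every entry of the answer list is ≤ v
  have hub : ∀ g ∈ L.map (fun p => greedy k p), g ≤ v := by
    intro g hg
    obtain ⟨p, hp, rfl⟩ := List.mem_map.mp hg
    obtain ⟨i, _, hpi⟩ := List.mem_flatMap.mp hp
    exact greedy_le_dfsB p k dungeons (mem_perms_subperm (i + 1) dungeons p hpi)
  -- some entry equals v
  have hex : ∃ g ∈ L.map (fun p => greedy k p), g = v := by
    obtain ⟨hle, p, hp, hgp⟩ := dfsB_attain dungeons.length dungeons (le_refl _) k
    by_cases hm : (dfsB k dungeons).toNat = 0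
    · -- v = 0: any length-1 permutation scores 0
      have hv0 : v = 0 := by have := dfsB_nonneg k dungeons; omega
      obtain ⟨q, hq⟩ := perms_one_exists hpre
      have hqL : q ∈ L := by
        refine List.mem_flatMap.mpr ⟨0, ?_, by simpa using hq⟩
        simp [List.length_pos_iff.mpr hpre]
      refine ⟨greedy k q, List.mem_map.mpr ⟨q, hqL, rfl⟩, ?_⟩
      have h1 := greedy_le_dfsB q k dungeons (mem_perms_subperm 1 dungeons q hq)
      have h2 := greedy_nonneg q k
      omega
    · refine ⟨greedy k p, List.mem_map.mpr ⟨p, ?_, rfl⟩, hgp⟩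
      refine List.mem_flatMap.mpr ⟨(dfsB k dungeons).toNat - 1, ?_, ?_⟩
      · refine List.mem_range.mpr ?_
        have hlp : 0 < dungeons.length := List.length_pos_iff.mpr hpre
        omega
      · have : (dfsB k dungeons).toNat - 1 + 1 = (dfsB k dungeons).toNat := by omega
        rw [this]; exact hp
  obtain ⟨g, hgmem, hgv⟩ := hex
  -- the answer list is nonempty, so max? is some m with m = the max value
  rcases hmax : PySem.List.max? (L.map (fun p => greedy k p)) (fun y => y) with _ | m
  · rw [PySem.List.max?_eq_none_iff] at hmax
    rw [hmax] at hgmem; cases hgmem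
  · have hmem := PySem.List.max?_mem hmax
    have hism := PySem.List.max?_isMax hmax
    have h1 : m ≤ v := hub m hmem
    have h2 : g ≤ m := hism g hgmem
    simp only [Option.getD_some]
    omega
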